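-- pv_equiv track=rewrite | github.com/CyrilGuoCODE/AQS | main_app.py | ensure_current_parent
-- ===== SOURCE A (Python) =====
-- def ensure_current_parent(queue):
--     has_current = any(item.get('status') == 'current' for item in queue)
--     if has_current:
--         return queue
--     for item in queue:
--         if item.get('status') == 'waiting':
--             item['status'] = 'current'
--             break
--     return queue
-- ===== SOURCE B (Python) =====
-- def ensure_current_parent(queue):
--     has_current = False
--     first_waiting = None
--     i = 0
--     for item in queue:
--         status = item.get('status')
--         if status == 'current':
--             has_current = True
--         elif status == 'waiting' and first_waiting is None:
--             first_waiting = i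
--         i += 1
--     if not has_current and first_waiting is not None:
--         queue[first_waiting]['status'] = 'current'
--     return queue
-- ===== Notes on version B (the rewrite author's own statement) =====
-- stated objective: alternative
-- what changed: B makes a single deferred-mutation pass recording has_current and the index of the first waiting item, then promotes it after the scan, instead of A's any() pass followed by a second mutate-and-break loop.
import Mathlib
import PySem

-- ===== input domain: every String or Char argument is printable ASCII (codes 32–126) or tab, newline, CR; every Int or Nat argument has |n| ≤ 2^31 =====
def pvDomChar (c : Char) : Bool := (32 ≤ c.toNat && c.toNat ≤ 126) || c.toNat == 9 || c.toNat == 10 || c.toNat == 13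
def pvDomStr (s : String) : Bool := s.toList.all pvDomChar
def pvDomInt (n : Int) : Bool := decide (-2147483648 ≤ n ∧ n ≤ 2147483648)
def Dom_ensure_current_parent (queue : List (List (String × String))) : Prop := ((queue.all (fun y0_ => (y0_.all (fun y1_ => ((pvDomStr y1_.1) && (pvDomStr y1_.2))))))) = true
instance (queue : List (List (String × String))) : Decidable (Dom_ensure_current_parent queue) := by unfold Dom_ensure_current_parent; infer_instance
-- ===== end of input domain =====

-- B replaces A's any() pass plus a second mutate-and-break loop with one deferred-mutation
-- pass recording has_current and the first waiting index (objective: alternative, same cost).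
-- Both Pythons mutate the promoted dict in place; the proved equivalence is about the
-- returned queue, and B performs the same in-place mutation as A.

-- ===== PORT A =====
-- item.get('status'): first match in the association list (Python dict: keys unique)
def pvGetStatus (d : List (String × String)) : Option String :=
  match d with
  | [] => none
  | (k, v) :: rest => if k == "status" then some v else pvGetStatus rest

-- item['status'] = 'current': overwrite in place (append if absent)
def pvSetCurrent (d : List (String × String)) : List (String × String) :=
  match d with
  | [] => [("status", "current")]
  | (k, v) :: rest => if k == "status" then (k, "current") :: rest else (k, v) :: pvSetCurrent rest

-- A's for-loop with break: promote the first waiting item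
def pvPromoteA (queue : List (List (String × String))) : List (List (String × String)) :=
  match queue with
  | [] => []
  | d :: rest =>
      if pvGetStatus d == some "waiting" then pvSetCurrent d :: rest
      else d :: pvPromoteA rest

def ensure_current_parent (queue : List (List (String × String))) : List (List (String × String)) :=
  let has_current := queue.any (fun item => pvGetStatus item == some "current")
  if has_current then queue
  else pvPromoteA queue

-- ===== PORT B =====
-- B's single loop: carry (has_current, first_waiting) over the queue with index i
def pvScanB (queue : List (List (String × String))) (i : Nat) (hc : Bool) (fw : Option Nat) :
    Bool × Option Nat :=
  match queue with
  | [] => (hc, fw)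
  | item :: rest =>
      let status := pvGetStatus item
      if status == some "current" then pvScanB rest (i + 1) true fw
      else if status == some "waiting" && fw == none then pvScanB rest (i + 1) hc (some i)
      else pvScanB rest (i + 1) hc fw

def ensure_current_parent_alt (queue : List (List (String × String))) : List (List (String × String)) :=
  match pvScanB queue 0 false none with
  | (false, some i) =>
      match queue[i]? with            -- i is always in range; the none branch only totalizes
      | some d => queue.set i (pvSetCurrent d)
      | none => queue
  | _ => queue

-- ===== PRECONDITION & SPEC =====
def Spec_ensure_current_parent (queue : List (List (String × String))) (out : List (List (String × String))) : Prop := out = ensure_current_parent_alt queue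
instance (queue : List (List (String × String))) (out : List (List (String × String))) : Decidable (Spec_ensure_current_parent queue out) := by unfold Spec_ensure_current_parent; infer_instance

-- ===== CLAIM (what is proved, stated in full; the proofs are below) =====
def Claim_equal_ensure_current_parent : Prop := ∀ (queue : List (List (String × String))), Dom_ensure_current_parent queue → Spec_ensure_current_parent queue (ensure_current_parent queue)

-- ===== LEMMAS AND PROOFS =====

-- once hc is true, the scan's first component stays true
theorem pvScanB_fst_true (q : List (List (String × String))) (i : Nat) (fw : Option Nat) :
    (pvScanB q i true fw).1 = true := by
  induction q generalizing i fw with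
  | nil => rfl
  | cons d rest ih =>
      simp only [pvScanB]
      split_ifs <;> exact ih _ _

-- with no current item, a set first_waiting is final
theorem pvScanB_no_current_some (q : List (List (String × String))) (i j : Nat)
    (h : q.any (fun item => pvGetStatus item == some "current") = false) :
    pvScanB q i false (some j) = (false, some j) := by
  induction q generalizing i with
  | nil => rfl
  | cons d rest ih =>
      simp only [List.any_cons, Bool.or_eq_false_iff] at h
      simp [pvScanB, h.1]
      exact ih _ h.2

-- with no current item, the scan finds the first waiting index (shifted by i)
theorem pvScanB_no_current (q : List (List (String × String))) (i : Nat)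
    (h : q.any (fun item => pvGetStatus item == some "current") = false) :
    pvScanB q i false none =
      (false, (q.findIdx? (fun item => pvGetStatus item == some "waiting")).map (· + i)) := by
  induction q generalizing i with
  | nil => rfl
  | cons d rest ih =>
      simp only [List.any_cons, Bool.or_eq_false_iff] at h
      by_cases hw : (pvGetStatus d == some "waiting") = true
      · simp [pvScanB, h.1, hw, List.findIdx?_cons,
          pvScanB_no_current_some rest (i + 1) i h.2]
      · have hw' : (pvGetStatus d == some "waiting") = false := by simpa using hw
        simp [pvScanB, h.1, hw', List.findIdx?_cons, ih (i + 1) h.2]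
        cases rest.findIdx? (fun item => pvGetStatus item == some "waiting") with
        | none => simp
        | some k => simp; omega

-- with some current item, the scan reports has_current
theorem pvScanB_has_current (q : List (List (String × String))) (i : Nat) (hc : Bool) (fw : Option Nat)
    (h : q.any (fun item => pvGetStatus item == some "current") = true) :
    (pvScanB q i hc fw).1 = true := by
  induction q generalizing i hc fw with
  | nil => simp at h
  | cons d rest ih =>
      simp only [List.any_cons, Bool.or_eq_true] at h
      simp only [pvScanB]
      split_ifs with h1 h2
      · exact pvScanB_fst_true _ _ _
      · cases h with
        | inl h => exact absurd h h1
        | inr h => exact ih _ _ _ h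
      · cases h with
        | inl h => exact absurd h h1
        | inr h => exact ih _ _ _ h

-- A's promote loop equals "set at the first waiting index"
theorem pvPromoteA_eq_set (q : List (List (String × String))) :
    pvPromoteA q =
      match q.findIdx? (fun item => pvGetStatus item == some "waiting") with
      | none => q
      | some i => q.set i (pvSetCurrent (q.getD i [])) := by
  induction q with
  | nil => rfl
  | cons d rest ih =>
      by_cases h1 : (pvGetStatus d == some "waiting") = true
      · simp [pvPromoteA, List.findIdx?_cons, h1]
      · have h1' : (pvGetStatus d == some "waiting") = false := by simpa using h1
        simp only [pvPromoteA, List.findIdx?_cons, h1', Bool.false_eq_true, if_false]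
        rw [ih]
        cases hfi : rest.findIdx? (fun item => pvGetStatus item == some "waiting") with
        | none => rfl
        | some k => simp [List.set_cons_succ]

-- ===== VERDICT (by name: the statement is the Claim_ definition above) =====
theorem ensure_current_parent_spec : Claim_equal_ensure_current_parent := by
  intro queue _
  show ensure_current_parent queue = ensure_current_parent_alt queue
  unfold ensure_current_parent ensure_current_parent_alt
  by_cases h : (queue.any fun item => pvGetStatus item == some "current") = true
  · have h1 := pvScanB_has_current queue 0 false none h
    rw [if_pos h]
    rcases hsc : pvScanB queue 0 false none with ⟨hc, fw⟩
    rw [hsc] at h1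
    simp only at h1
    subst h1
    cases fw <;> rfl
  · have h' : (queue.any fun item => pvGetStatus item == some "current") = false := by
      simpa using h
    rw [if_neg (by simp [h']), pvScanB_no_current queue 0 h', pvPromoteA_eq_set]
    cases hfi : queue.findIdx? (fun item => pvGetStatus item == some "waiting") with
    | none => rfl
    | some i =>
        have hlt : i < queue.length :=
          (List.findIdx?_eq_some_iff_findIdx_eq.mp hfi).1
        have hget : queue[i]? = some (queue.getD i []) := by
          rw [List.getElem?_eq_getElem hlt]
          simp [List.getD, List.getElem?_eq_getElem hlt]
        simp only [Option.map_some, Nat.add_zero]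
        rw [hget]
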